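-- pv_equiv track=rewrite | github.com/janezaletskaya/algorithms | algorithm_training_2024/week2/H.py | solution
-- ===== SOURCE A (Python) =====
-- def solution(lst):
--     total = sum(lst)
--     h = total // 2
--
--     cur_sum = 0
--     med = 0
--     for i, elem in enumerate(lst):
--         cur_sum += elem
--         if cur_sum > h:
--             med = i
--             break
--
--     res = sum(abs(i - med) * elem for i, elem in enumerate(lst))
--
--     return res
-- ===== SOURCE B (Python) =====
-- def solution(lst):
--     n = len(lst)
--     prefix = [0]
--     for w in lst:
--         prefix.append(prefix[-1] + w)
--     total = prefix[n]
--     h = total // 2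
--     med = 0
--     for i in range(n):
--         if prefix[i + 1] > h:
--             med = i
--             break
--     res = 0
--     for b in range(1, n):
--         if b <= med:
--             res += prefix[b]
--         else:
--             res += total - prefix[b]
--     return res
-- ===== Notes on version B (the rewrite author's own statement) =====
-- stated objective: alternative
-- what changed: B builds an explicit prefix-sum array, finds the median index by scanning it, and computes the cost by summing weight mass over the n-1 unit boundaries (prefix[b] left of the median, total-prefix[b] right of it) instead of summing |i-med|*w per element.
import Mathlib
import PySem

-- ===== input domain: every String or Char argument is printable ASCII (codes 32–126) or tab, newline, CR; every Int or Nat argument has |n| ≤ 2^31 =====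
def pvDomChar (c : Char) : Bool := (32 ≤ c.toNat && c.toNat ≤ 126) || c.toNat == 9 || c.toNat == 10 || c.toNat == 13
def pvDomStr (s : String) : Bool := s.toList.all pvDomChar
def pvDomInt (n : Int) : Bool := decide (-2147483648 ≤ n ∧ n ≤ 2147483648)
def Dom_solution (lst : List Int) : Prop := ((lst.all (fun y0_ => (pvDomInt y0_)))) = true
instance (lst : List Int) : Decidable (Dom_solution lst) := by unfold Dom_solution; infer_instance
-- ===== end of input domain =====

-- B replaces A's per-element |i-med|*w sum by a prefix-sum array and a sum over unit boundaries; same O(n) cost.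

-- ===== PORT A =====
-- the 'for i, elem ... if cur_sum > h: med = i; break' loop (med defaults to 0)
def solnMedLoop : List Int → Int → Int → Int → Int
  | [], _, _, _ => 0
  | e :: t, i, cur, h => if cur + e > h then i else solnMedLoop t (i + 1) (cur + e) h

def solution (lst : List Int) : Int :=
  let total := lst.sum
  let h := PySem.Int.floordiv total 2
  let med := solnMedLoop lst 0 0 h
  (PySem.List.enumerate lst 0).foldl (fun r p => r + |p.1 - med| * p.2) 0

-- ===== PORT B =====
-- the 'for i in range(n): if prefix[i+1] > h: med = i; break' loop (med defaults to 0)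
def altMedScan (pfx : List Int) (h : Int) : List Int → Int
  | [] => 0
  | i :: rest => if PySem.List.pyGetD pfx (i + 1) 0 > h then i else altMedScan pfx h rest

def solution_alt (lst : List Int) : Int :=
  let n : Int := lst.length
  let pfx := lst.foldl (fun p w => p ++ [PySem.List.pyGetD p (-1) 0 + w]) [0]
  let total := PySem.List.pyGetD pfx n 0
  let h := PySem.Int.floordiv total 2
  let med := altMedScan pfx h (PySem.List.pyRange 0 n 1)
  (PySem.List.pyRange 1 n 1).foldl
    (fun r b => if b ≤ med then r + PySem.List.pyGetD pfx b 0
                else r + (total - PySem.List.pyGetD pfx b 0)) 0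

-- ===== PRECONDITION & SPEC =====
def Spec_solution (lst : List Int) (out : Int) : Prop := out = solution_alt lst
instance (lst : List Int) (out : Int) : Decidable (Spec_solution lst out) := by unfold Spec_solution; infer_instance

-- ===== CLAIM (what is proved, stated in full; the proofs are below) =====
def Claim_equal_solution : Prop := ∀ (lst : List Int), Dom_solution lst → Spec_solution lst (solution lst)

-- ===== LEMMAS AND PROOFS =====

-- spec-level versions of the two sums
def dsum : List Int → Int → Int
  | [], _ => 0
  | w :: t, m => |m| * w + dsum t (m - 1)

def brhs (lst : List Int) (m : Int) : Int :=
  ((List.range (lst.length - 1)).map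
    (fun (k : Nat) => if (k : Int) + 1 ≤ m then (lst.take (k + 1)).sum
              else lst.sum - (lst.take (k + 1)).sum)).sum

def prefixFrom (a : Int) : List Int → List Int
  | [] => []
  | w :: t => (a + w) :: prefixFrom (a + w) t

theorem pfx_foldl (l : List Int) : ∀ (P : List Int) (x : Int),
    l.foldl (fun p w => p ++ [PySem.List.pyGetD p (-1) 0 + w]) (P ++ [x])
      = P ++ [x] ++ prefixFrom x l := by
  induction l with
  | nil => intro P x; simp [List.foldl, prefixFrom]
  | cons w t ih =>
    intro P x
    simp only [List.foldl, PySem.List.pyGetD_neg_one_append_singleton]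
    have := ih (P ++ [x]) (x + w)
    simp only [List.append_assoc] at this ⊢
    rw [this]
    simp [prefixFrom]

theorem pfx_eq (lst : List Int) :
    lst.foldl (fun p w => p ++ [PySem.List.pyGetD p (-1) 0 + w]) [0]
      = 0 :: prefixFrom 0 lst := by
  have := pfx_foldl lst [] 0
  simpa using this

theorem prefixFrom_getD (l : List Int) : ∀ (a : Int) (k : Nat), k < l.length →
    (prefixFrom a l).getD k 0 = a + (l.take (k + 1)).sum := by
  induction l with
  | nil => intro a k hk; simp at hk
  | cons w t ih =>
    intro a k hk
    cases k with
    | zero => simp [prefixFrom]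
    | succ k =>
      simp only [prefixFrom, List.getD_cons_succ]
      rw [ih (a + w) k (by simpa using hk)]
      simp [List.take_succ_cons]
      ring

theorem pfx_getD (lst : List Int) (k : Nat) (hk : k ≤ lst.length) :
    (0 :: prefixFrom 0 lst).getD k 0 = (lst.take k).sum := by
  cases k with
  | zero => simp
  | succ k =>
    simp only [List.getD_cons_succ]
    rw [prefixFrom_getD lst 0 k (by omega)]
    simp

-- A's result sum equals dsum
theorem a_res (lst : List Int) (m : Int) : ∀ (s : Int) (acc : Int),
    (PySem.List.enumerate lst s).foldl (fun r p => r + |p.1 - m| * p.2) acc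
      = acc + dsum lst (m - s) := by
  induction lst generalizing m with
  | nil => intro s acc; simp [PySem.List.enumerate, dsum]
  | cons w t ih =>
    intro s acc
    rw [PySem.List.enumerate_cons]
    simp only [List.foldl_cons]
    rw [ih m (s + 1) (acc + |s - m| * w)]
    simp only [dsum]
    have h1 : |s - m| = |m - s| := abs_sub_comm s m
    have h2 : m - (s + 1) = m - s - 1 := by ring
    rw [h1, h2]; ring

-- med agreement
theorem med_eq (lst : List Int) (h : Int) : ∀ (t : List Int) (j : Nat),
    t = lst.drop j →
    solnMedLoop t (j : Int) ((lst.take j).sum) h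
      = altMedScan (0 :: prefixFrom 0 lst) h (PySem.List.pyRange (j : Int) (lst.length : Int) 1) := by
  intro t
  induction t with
  | nil =>
    intro j hj
    have hlen : lst.length ≤ j := by
      by_contra hc
      have := List.drop_eq_nil_iff.mp hj.symm
      omega
    rw [PySem.List.pyRange_one_eq_nil (by exact_mod_cast hlen)]
    rfl
  | cons e t ih =>
    intro j hj
    have hjlt : j < lst.length := by
      by_contra hc
      rw [List.drop_eq_nil_of_le (by omega)] at hj
      exact List.cons_ne_nil e t hj
    have hget : lst[j]? = some e := by
      have : (lst.drop j)[0]? = some e := by rw [← hj]; rfl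
      simpa [List.getElem?_drop] using this
    have htake : (lst.take (j + 1)).sum = (lst.take j).sum + e := by
      rw [List.take_add_one, hget]
      simp
    rw [PySem.List.pyRange_one_cons (by exact_mod_cast hjlt)]
    simp only [solnMedLoop, altMedScan]
    have hpget : PySem.List.pyGetD (0 :: prefixFrom 0 lst) ((j : Int) + 1) 0
        = (lst.take j).sum + e := by
      have : ((j : Int) + 1) = ((j + 1 : Nat) : Int) := by push_cast; ring
      rw [this, PySem.List.pyGetD_natCast, pfx_getD lst (j + 1) (by omega), htake]
    rw [hpget]
    split
    · rfl
    · have hdrop : t = lst.drop (j + 1) := by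
        have : lst.drop (j + 1) = (lst.drop j).tail := by
          rw [← hj]
          rw [← List.drop_drop]
          rw [← hj]
          rfl
        rw [this, ← hj]
        rfl
      have := ih (j + 1) hdrop
      rw [htake] at this
      push_cast at this ⊢
      convert this using 2

-- med bounds
theorem med_bounds : ∀ (t : List Int) (j cur h : Int), 0 ≤ j →
    solnMedLoop t j cur h = 0 ∨ (j ≤ solnMedLoop t j cur h ∧ solnMedLoop t j cur h < j + t.length) := by
  intro t
  induction t with
  | nil => intro j cur h hj; left; rfl
  | cons e t ih =>
    intro j cur h hj
    simp only [solnMedLoop, List.length_cons]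
    split
    · right; constructor
      · exact le_refl j
      · push_cast; omega
    · rcases ih (j + 1) (cur + e) h (by omega) with h0 | ⟨h1, h2⟩
      · left; exact h0
      · right; constructor
        · omega
        · push_cast at h2 ⊢; omega

-- counting lemma
theorem sum_indicator (w : Int) : ∀ (N : Nat) (c : Int), 0 ≤ c →
    ((List.range N).map (fun (j : Nat) => if (j : Int) + 1 ≤ c then w else 0)).sum = min c N * w := by
  intro N
  induction N with
  | zero => intro c hc; simp; omega
  | succ N ih =>
    intro c hc
    rw [List.range_succ, List.map_append, List.sum_append, ih c hc]
    simp only [List.map_cons, List.map_nil, List.sum_cons, List.sum_nil]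
    by_cases hcN : (N : Int) + 1 ≤ c
    · rw [if_pos hcN]
      have h1 : min c (N : Int) = N := by omega
      have h2 : min c ((N : Nat) + 1 : Nat) = (N : Int) + 1 := by push_cast; omega
      rw [h1]
      push_cast
      rw [min_eq_right (by omega)]
      ring
    · rw [if_neg hcN]
      have h1 : min c (N : Int) = min c ((N : Nat) + 1 : Nat) := by push_cast; omega
      rw [h1]
      ring

theorem sum_map_range_congr (f g : Nat → Int) (N : Nat) (h : ∀ k, k < N → f k = g k) :
    ((List.range N).map f).sum = ((List.range N).map g).sum := by
  rw [List.map_congr_left]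
  intro a ha
  exact h a (List.mem_range.mp ha)

theorem sum_map_range_shift (f : Nat → Int) (N : Nat) :
    ((List.range (N + 1)).map f).sum = f 0 + ((List.range N).map (fun k => f (k + 1))).sum := by
  rw [List.range_succ_eq_map]
  simp only [List.map_cons, List.sum_cons, List.map_map]
  rfl

theorem brhs_zero_cons (w : Int) (t : List Int) : brhs (w :: t) 0 = t.sum + brhs t 0 := by
  simp only [brhs, List.length_cons, Nat.add_sub_cancel]
  cases t with
  | nil => simp
  | cons v t' =>
    rw [show (v :: t').length = t'.length + 1 from rfl, sum_map_range_shift]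
    rw [sum_map_range_congr _
      (fun (k : Nat) => if (k : Int) + 1 ≤ (0:Int) then ((v :: t').take (k + 1)).sum
          else (v :: t').sum - ((v :: t').take (k + 1)).sum)
      _
      (by
        intro k hk
        have hc1 : ¬ (((k + 1 : Nat) : Int) + 1 ≤ (0:Int)) := by push_cast; omega
        have hc2 : ¬ ((k : Int) + 1 ≤ (0:Int)) := by omega
        simp only [if_neg hc1, if_neg hc2, List.take_succ_cons, List.sum_cons]
        ring)]
    rw [show t'.length + 1 - 1 = t'.length from rfl]
    rw [if_neg (show ¬ (((0:Nat):Int) + 1 ≤ 0) by norm_num)]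
    simp only [List.take_succ_cons, List.take_zero, List.sum_cons, List.sum_nil]
    ring

theorem brhs_cons_pos (w : Int) (t : List Int) (m : Int) (hm1 : 0 < m) (hm2 : m ≤ (t.length : Int)) :
    brhs (w :: t) m = m * w + brhs t (m - 1) := by
  cases t with
  | nil => simp at hm2; omega
  | cons v t' =>
    simp only [brhs, List.length_cons, Nat.add_sub_cancel]
    rw [sum_map_range_shift]
    rw [sum_map_range_congr _
      (fun (k : Nat) => (if (k : Int) + 1 ≤ m - 1 then ((v :: t').take (k + 1)).sum
          else (v :: t').sum - ((v :: t').take (k + 1)).sum)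
        + (if (k : Int) + 1 ≤ m - 1 then w else 0))
      _
      (by
        intro k hk
        change _ = (if (k : Int) + 1 ≤ m - 1 then ((v :: t').take (k + 1)).sum
          else (v :: t').sum - ((v :: t').take (k + 1)).sum)
          + (if (k : Int) + 1 ≤ m - 1 then w else 0)
        by_cases hc : (k : Int) + 1 ≤ m - 1
        · rw [if_pos (show ((k + 1 : Nat) : Int) + 1 ≤ m by push_cast; omega), if_pos hc, if_pos hc]
          simp only [List.take_succ_cons, List.sum_cons]
          ring
        · rw [if_neg (show ¬ (((k + 1 : Nat) : Int) + 1 ≤ m) by push_cast; omega), if_neg hc, if_neg hc]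
          simp only [List.take_succ_cons, List.sum_cons]
          ring)]
    rw [PySem.List.sum_map_add_int]
    rw [sum_indicator w t'.length (m - 1) (by omega)]
    rw [if_pos (show ((0:Nat) : Int) + 1 ≤ m by push_cast; omega)]
    rw [show min (m - 1) (t'.length : Int) = m - 1 by
      simp only [List.length_cons] at hm2; push_cast at hm2 ⊢; omega]
    simp only [List.take_succ_cons, List.take_zero, List.sum_cons, List.sum_nil]
    ring

theorem dsum_nonpos (lst : List Int) : ∀ (m : Int), m ≤ 0 →
    dsum lst m = brhs lst 0 - m * lst.sum := by
  induction lst with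
  | nil => intro m hm; simp [dsum, brhs]
  | cons w t ih =>
    intro m hm
    simp only [dsum, List.sum_cons]
    rw [abs_of_nonpos hm, ih (m - 1) (by omega), brhs_zero_cons]
    ring

theorem dsum_eq_brhs (lst : List Int) : ∀ (m : Int), 0 ≤ m → m < lst.length →
    dsum lst m = brhs lst m := by
  induction lst with
  | nil => intro m hm0 hm1; simp at hm1; omega
  | cons w t ih =>
    intro m hm0 hm1
    rcases eq_or_lt_of_le hm0 with h0 | h1
    · rw [← h0]
      simp only [dsum, abs_zero, zero_mul, zero_add]
      rw [dsum_nonpos t (0 - 1) (by omega), brhs_zero_cons]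
      ring
    · have hmlen : m ≤ (t.length : Int) := by
        simp only [List.length_cons] at hm1; push_cast at hm1 ⊢; omega
      simp only [dsum]
      rw [abs_of_nonneg hm0, ih (m - 1) (by omega) (by omega), brhs_cons_pos w t m h1 hmlen]

-- B's result fold equals brhs
theorem b_res (lst : List Int) (m : Int) :
    (PySem.List.pyRange 1 (lst.length : Int) 1).foldl
      (fun r b => if b ≤ m then r + PySem.List.pyGetD (0 :: prefixFrom 0 lst) b 0
                  else r + ((lst.sum) - PySem.List.pyGetD (0 :: prefixFrom 0 lst) b 0)) 0
      = brhs lst m := by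
  have step1 : (PySem.List.pyRange 1 (lst.length : Int) 1).foldl
      (fun r b => if b ≤ m then r + PySem.List.pyGetD (0 :: prefixFrom 0 lst) b 0
                  else r + ((lst.sum) - PySem.List.pyGetD (0 :: prefixFrom 0 lst) b 0)) 0
      = (PySem.List.pyRange 1 (lst.length : Int) 1).foldl
      (fun r b => r + (if b ≤ m then PySem.List.pyGetD (0 :: prefixFrom 0 lst) b 0
                  else lst.sum - PySem.List.pyGetD (0 :: prefixFrom 0 lst) b 0)) 0 :=
    PySem.List.foldl_congr_mem _ _ _ _ (fun acc x _ => by split <;> rfl)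
  rw [step1, PySem.List.foldl_add, PySem.List.pyRange_one, List.map_map, zero_add]
  rw [show ((lst.length : Int) - 1).toNat = lst.length - 1 by omega]
  exact sum_map_range_congr _ _ _ (by
    intro k hk
    change (if 1 + (k : Int) ≤ m then PySem.List.pyGetD (0 :: prefixFrom 0 lst) (1 + (k : Int)) 0
        else lst.sum - PySem.List.pyGetD (0 :: prefixFrom 0 lst) (1 + (k : Int)) 0)
      = if (k : Int) + 1 ≤ m then (lst.take (k + 1)).sum else lst.sum - (lst.take (k + 1)).sum
    have hg : PySem.List.pyGetD (0 :: prefixFrom 0 lst) (1 + (k : Int)) 0 = (lst.take (k + 1)).sum := by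
      rw [show (1 + (k : Int)) = ((k + 1 : Nat) : Int) by push_cast; ring]
      rw [PySem.List.pyGetD_natCast, pfx_getD lst (k + 1) (by omega)]
    rw [hg, add_comm 1 (k : Int)])


-- ===== VERDICT (by name: the statement is the Claim_ definition above) =====
theorem solution_spec : Claim_equal_solution := by
  intro lst _
  show solution lst = solution_alt lst
  rcases lst with _ | ⟨x, t⟩
  · rfl
  set lst := x :: t with hlst
  simp only [solution, solution_alt, pfx_eq]
  have htot : PySem.List.pyGetD (0 :: prefixFrom 0 lst) ((lst.length : Int)) 0 = lst.sum := by
    rw [PySem.List.pyGetD_natCast, pfx_getD lst lst.length (le_refl _), List.take_length]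
  rw [htot]
  have hmed : altMedScan (0 :: prefixFrom 0 lst) (PySem.Int.floordiv lst.sum 2)
      (PySem.List.pyRange 0 (lst.length : Int) 1)
      = solnMedLoop lst 0 0 (PySem.Int.floordiv lst.sum 2) := by
    have := med_eq lst (PySem.Int.floordiv lst.sum 2) lst 0 (by simp)
    simpa using this.symm
  rw [hmed]
  rw [b_res lst (solnMedLoop lst 0 0 (PySem.Int.floordiv lst.sum 2))]
  rw [a_res lst (solnMedLoop lst 0 0 (PySem.Int.floordiv lst.sum 2)) 0 0]
  rw [sub_zero, zero_add]
  have hb := med_bounds lst 0 0 (PySem.Int.floordiv lst.sum 2) le_rfl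
  have hlen : (1 : Int) ≤ (lst.length : Int) := by
    rw [hlst]; simp only [List.length_cons]; push_cast; omega
  rcases hb with h0 | ⟨h1, h2⟩
  · rw [h0]
    exact dsum_eq_brhs lst 0 (by omega) (by omega)
  · exact dsum_eq_brhs lst _ (by omega) (by omega)
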